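-- pv_equiv track=rewrite | github.com/yg-moon/problem-solving | programmers/practice-kit/dfs-bfs/Lv3-아이템 줍기.py | calc_borders
-- ===== SOURCE A (Python) =====
-- def calc_borders(rectangle):
--     borders = []
--     not_allowed = set()
--
--     for x1, y1, x2, y2 in rectangle:
--         # 모든 좌표를 2배로 계산
--         x1 = x1 * 2
--         y1 = y1 * 2
--         x2 = x2 * 2
--         y2 = y2 * 2
--         # 다른 사각형 내부에 있는 좌표는 제외
--         for i in range(x1 + 1, x2):
--             for j in range(y1 + 1, y2):
--                 not_allowed.add((i, j))
--
--     for x1, y1, x2, y2 in rectangle: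
--         x1 = x1 * 2
--         y1 = y1 * 2
--         x2 = x2 * 2
--         y2 = y2 * 2
--         # 각 사각형의 테두리 좌표를 저장
--         rect_border = set()
--         for i in range(x1, x2 + 1):
--             for j in range(y1, y2 + 1):
--                 if (i, j) not in not_allowed:
--                     if i == x1 or i == x2:
--                         rect_border.add((i, j))
--                     else:
--                         if j == y1 or j == y2:
--                             rect_border.add((i, j))
--         borders.append(rect_border)
--
--     return borders
-- ===== SOURCE B (Python) =====
-- def calc_borders(rectangle):
--     # Walk only the perimeter cells of each (doubled) rectangle and test each one
--     # directly against the rectangle list, instead of pre-filling a set with every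
--     # interior cell of every rectangle.
--     doubled = [(2 * a, 2 * b, 2 * c, 2 * d) for a, b, c, d in rectangle]
--
--     def hidden(i, j):
--         return any(a < i < c and b < j < d for a, b, c, d in doubled)
--
--     borders = []
--     for x1, y1, x2, y2 in doubled:
--         perimeter = []
--         if x1 <= x2 and y1 <= y2:  # a degenerate "rectangle" has no border cells
--             perimeter += [(x1, j) for j in range(y1, y2 + 1)]
--             for i in range(x1 + 1, x2):
--                 perimeter += [(i, y1), (i, y2)]
--             if x1 < x2:
--                 perimeter += [(x2, j) for j in range(y1, y2 + 1)]
--         borders.append({(i, j) for i, j in perimeter if not hidden(i, j)})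
--     return borders
-- ===== Notes on version B (the rewrite author's own statement) =====
-- stated objective: faster
-- what changed: B enumerates only the perimeter cells of each doubled rectangle and tests each one for strict containment directly against the rectangle list, instead of pre-filling a set with every interior cell of every rectangle and scanning each rectangle's full area.
import Mathlib
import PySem

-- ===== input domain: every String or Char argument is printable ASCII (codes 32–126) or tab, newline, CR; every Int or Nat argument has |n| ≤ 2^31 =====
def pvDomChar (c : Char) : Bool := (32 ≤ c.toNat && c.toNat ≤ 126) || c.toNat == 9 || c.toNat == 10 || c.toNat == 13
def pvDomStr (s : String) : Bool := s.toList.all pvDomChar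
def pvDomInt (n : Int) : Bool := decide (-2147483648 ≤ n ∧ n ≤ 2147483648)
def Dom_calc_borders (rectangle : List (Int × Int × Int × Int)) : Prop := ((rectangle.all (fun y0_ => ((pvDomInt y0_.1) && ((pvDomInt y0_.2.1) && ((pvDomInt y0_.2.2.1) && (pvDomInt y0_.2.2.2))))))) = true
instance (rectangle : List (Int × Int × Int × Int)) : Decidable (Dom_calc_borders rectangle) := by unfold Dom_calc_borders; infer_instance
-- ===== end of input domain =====

-- ===== PORT A =====
-- B walks only perimeter cells, testing hidden cells directly against the rectangle
-- list, instead of pre-filling a set with every interior cell (objective: faster).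

-- not_allowed.add((i,j)) over the open box (x1,x2) x (y1,y2)   [coords already doubled]
def pvNaBlock (x1 y1 x2 y2 : Int) (na : PySem.Set (Int × Int)) : PySem.Set (Int × Int) :=
  (PySem.List.pyRange (x1 + 1) x2 1).foldl (fun na i =>
    (PySem.List.pyRange (y1 + 1) y2 1).foldl (fun na j => PySem.Set.add na (i, j)) na) na

def pvNotAllowed (rectangle : List (Int × Int × Int × Int)) : PySem.Set (Int × Int) :=
  rectangle.foldl
    (fun na r => pvNaBlock (r.1 * 2) (r.2.1 * 2) (r.2.2.1 * 2) (r.2.2.2 * 2) na)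
    PySem.Set.empty

-- the second loop body for one rectangle (coords already doubled)
def pvRectBorder (na : PySem.Set (Int × Int)) (x1 y1 x2 y2 : Int) : PySem.Set (Int × Int) :=
  (PySem.List.pyRange x1 (x2 + 1) 1).foldl (fun rb i =>
    (PySem.List.pyRange y1 (y2 + 1) 1).foldl (fun rb j =>
      if ¬ PySem.Set.contains na (i, j) then
        if i = x1 ∨ i = x2 then PySem.Set.add rb (i, j)
        else if j = y1 ∨ j = y2 then PySem.Set.add rb (i, j)
        else rb
      else rb) rb) PySem.Set.empty

def calc_borders (rectangle : List (Int × Int × Int × Int)) : List (List (Int × Int)) :=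
  let na := pvNotAllowed rectangle
  rectangle.foldl
    (fun borders r =>
      borders ++ [pvRectBorder na (r.1 * 2) (r.2.1 * 2) (r.2.2.1 * 2) (r.2.2.2 * 2)])
    []

-- ===== PORT B =====
def pvHidden (doubled : List (Int × Int × Int × Int)) (p : Int × Int) : Bool :=
  doubled.any (fun r =>
    decide (r.1 < p.1) && decide (p.1 < r.2.2.1) && decide (r.2.1 < p.2) && decide (p.2 < r.2.2.2))

def pvPerimeter (x1 y1 x2 y2 : Int) : List (Int × Int) :=
  if x1 ≤ x2 ∧ y1 ≤ y2 then
    ((PySem.List.pyRange y1 (y2 + 1) 1).map (fun j => (x1, j)))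
    ++ ((PySem.List.pyRange (x1 + 1) x2 1).foldl (fun acc i => acc ++ [(i, y1), (i, y2)]) [])
    ++ (if x1 < x2 then (PySem.List.pyRange y1 (y2 + 1) 1).map (fun j => (x2, j)) else [])
  else []

def calc_borders_alt (rectangle : List (Int × Int × Int × Int)) : List (List (Int × Int)) :=
  let doubled := rectangle.map (fun r => (2 * r.1, 2 * r.2.1, 2 * r.2.2.1, 2 * r.2.2.2))
  doubled.map (fun r =>
    PySem.Set.ofList ((pvPerimeter r.1 r.2.1 r.2.2.1 r.2.2.2).filter
      (fun p => ! pvHidden doubled p)))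

-- ===== PRECONDITION & SPEC =====
def Spec_calc_borders (rectangle : List (Int × Int × Int × Int)) (out : List (List (Int × Int))) : Prop := out = calc_borders_alt rectangle
instance (rectangle : List (Int × Int × Int × Int)) (out : List (List (Int × Int))) : Decidable (Spec_calc_borders rectangle out) := by unfold Spec_calc_borders; infer_instance

-- ===== CLAIM (what is proved, stated in full; the proofs are below) =====
def Claim_equal_calc_borders : Prop := ∀ (rectangle : List (Int × Int × Int × Int)), Dom_calc_borders rectangle → Spec_calc_borders rectangle (calc_borders rectangle)

-- ===== LEMMAS AND PROOFS =====

-- one full row of grid points at abscissa i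
def pvRow (y1 y2 i : Int) : List (Int × Int) :=
  (PySem.List.pyRange y1 (y2 + 1) 1).map (fun j => (i, j))

-- the border condition of A's inner loop, as a Bool predicate
def pvBorderB (x1 y1 x2 y2 : Int) (p : Int × Int) : Bool :=
  p.1 == x1 || p.1 == x2 || p.2 == y1 || p.2 == y2

lemma foldl_add_if {α β : Type} [BEq α] [LawfulBEq α] (C : α → Bool) (f : β → α) :
    ∀ (l : List β) (s : PySem.Set α),
      l.foldl (fun s x => if C (f x) then PySem.Set.add s (f x) else s) s
        = ((l.map f).filter C).foldl PySem.Set.add s := by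
  intro l
  induction l with
  | nil => intro s; rfl
  | cons x xs ih =>
    intro s
    by_cases h : C (f x) <;> simp [h, ih]

lemma foldl_foldl_flatMap {α ι : Type} (g : ι → List α) (f : List α → α → List α) :
    ∀ (l : List ι) (s : List α),
      l.foldl (fun s i => (g i).foldl f s) s = (l.flatMap g).foldl f s := by
  intro l
  induction l with
  | nil => intro s; rfl
  | cons x xs ih => intro s; simp [ih, List.foldl_append]

lemma filter_flatMap {α ι : Type} (g : ι → List α) (P : α → Bool) (l : List ι) :
    (l.flatMap g).filter P = l.flatMap (fun i => (g i).filter P) := by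
  induction l with
  | nil => rfl
  | cons x xs ih => simp [List.filter_append, ih]

-- set(filter) = filter(set): first occurrences of kept elements keep their order
lemma ofList_filter {α : Type} [BEq α] [LawfulBEq α] (P : α → Bool) (l : List α) :
    PySem.Set.ofList (l.filter P) = (PySem.Set.ofList l).filter P := by
  induction l using List.reverseRecOn with
  | nil => rfl
  | append_singleton l x ih =>
    rw [List.filter_append, PySem.Set.ofList_append_singleton]
    by_cases hm : x ∈ PySem.Set.ofList l
    · rw [PySem.Set.add_of_mem hm]
      by_cases hP : P x
      · rw [show List.filter P [x] = [x] by simp [hP], PySem.Set.ofList_append_singleton, ih,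
            PySem.Set.add_of_mem (List.mem_filter.mpr ⟨hm, hP⟩)]
      · rw [show List.filter P [x] = [] by simp [hP], List.append_nil, ih]
    · rw [PySem.Set.add_of_not_mem hm, List.filter_append]
      by_cases hP : P x
      · rw [show List.filter P [x] = [x] by simp [hP], PySem.Set.ofList_append_singleton, ih,
            PySem.Set.add_of_not_mem (fun h => hm (List.mem_filter.mp h).1)]
      · rw [show List.filter P [x] = [] by simp [hP], List.append_nil, List.append_nil, ih]

lemma mem_double_fold (g : Int → List Int) :
    ∀ (l : List Int) (s : PySem.Set (Int × Int)) (p : Int × Int),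
      p ∈ l.foldl (fun s i => (g i).foldl (fun s j => PySem.Set.add s (i, j)) s) s ↔
        p ∈ s ∨ ∃ i ∈ l, ∃ j ∈ g i, p = (i, j) := by
  intro l
  induction l with
  | nil => simp
  | cons x xs ih =>
    intro s p
    simp only [List.foldl_cons, ih, PySem.Set.mem_foldl_add, List.mem_cons]
    aesop

lemma mem_pvNaBlock (x1 y1 x2 y2 : Int) (s : PySem.Set (Int × Int)) (p : Int × Int) :
    p ∈ pvNaBlock x1 y1 x2 y2 s ↔
      p ∈ s ∨ (x1 < p.1 ∧ p.1 < x2 ∧ y1 < p.2 ∧ p.2 < y2) := by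
  unfold pvNaBlock
  rw [mem_double_fold]
  simp only [PySem.List.mem_pyRange_one]
  constructor
  · rintro (h | ⟨i, hi, j, hj, rfl⟩)
    · exact Or.inl h
    · exact Or.inr (by simp; omega)
  · rintro (h | h)
    · exact Or.inl h
    · exact Or.inr ⟨p.1, by omega, p.2, by omega, rfl⟩

lemma mem_pvNotAllowed_fold :
    ∀ (l : List (Int × Int × Int × Int)) (s : PySem.Set (Int × Int)) (p : Int × Int),
      p ∈ l.foldl (fun na r => pvNaBlock (r.1 * 2) (r.2.1 * 2) (r.2.2.1 * 2) (r.2.2.2 * 2) na) s ↔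
        p ∈ s ∨ ∃ r ∈ l, r.1 * 2 < p.1 ∧ p.1 < r.2.2.1 * 2 ∧ r.2.1 * 2 < p.2 ∧ p.2 < r.2.2.2 * 2 := by
  intro l
  induction l with
  | nil => simp
  | cons x xs ih =>
    intro s p
    simp only [List.foldl_cons, ih, mem_pvNaBlock, List.mem_cons]
    aesop

lemma contains_pvNotAllowed (rectangle : List (Int × Int × Int × Int)) (p : Int × Int) :
    PySem.Set.contains (pvNotAllowed rectangle) p
      = pvHidden (rectangle.map (fun r => (2 * r.1, 2 * r.2.1, 2 * r.2.2.1, 2 * r.2.2.2))) p := by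
  rw [Bool.eq_iff_iff, PySem.Set.contains_iff]
  unfold pvNotAllowed pvHidden
  rw [mem_pvNotAllowed_fold]
  simp only [PySem.Set.empty]
  simp [List.any_eq_true]
  constructor
  · rintro ⟨a, b, c, d, h, h1, h2, h3, h4⟩
    exact ⟨a, b, c, d, h, ⟨⟨by omega, by omega⟩, by omega⟩, by omega⟩
  · rintro ⟨a, b, c, d, h, ⟨⟨h1, h2⟩, h3⟩, h4⟩
    exact ⟨a, b, c, d, h, by omega, by omega, by omega, by omega⟩

-- A's inner j-loop, as a fold of plain adds over the filtered row
lemma pvInner_eq (na : PySem.Set (Int × Int)) (x1 y1 x2 y2 i : Int) (rb : PySem.Set (Int × Int)) :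
    (PySem.List.pyRange y1 (y2 + 1) 1).foldl (fun rb j =>
        if ¬ PySem.Set.contains na (i, j) then
          if i = x1 ∨ i = x2 then PySem.Set.add rb (i, j)
          else if j = y1 ∨ j = y2 then PySem.Set.add rb (i, j)
          else rb
        else rb) rb
      = ((pvRow y1 y2 i).filter
          (fun p => (! PySem.Set.contains na p) && pvBorderB x1 y1 x2 y2 p)).foldl
          PySem.Set.add rb := by
  have hstep : (fun (rb : PySem.Set (Int × Int)) (j : Int) =>
      if ¬ PySem.Set.contains na (i, j) then
        if i = x1 ∨ i = x2 then PySem.Set.add rb (i, j)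
        else if j = y1 ∨ j = y2 then PySem.Set.add rb (i, j)
        else rb
      else rb)
    = (fun rb j =>
        if (! PySem.Set.contains na (i, j)) && pvBorderB x1 y1 x2 y2 (i, j)
        then PySem.Set.add rb (i, j) else rb) := by
    funext rb j
    by_cases hc : PySem.Set.contains na (i, j) <;>
      by_cases h1 : i = x1 <;> by_cases h2 : i = x2 <;>
      by_cases h3 : j = y1 <;> by_cases h4 : j = y2 <;>
      simp_all [pvBorderB]
  rw [hstep,
      foldl_add_if (fun p => (! PySem.Set.contains na p) && pvBorderB x1 y1 x2 y2 p)
        (fun j => (i, j))]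
  rfl

-- A's double loop as a single fold over the filtered flattened grid
lemma pvRectBorder_eq_fold (na : PySem.Set (Int × Int)) (x1 y1 x2 y2 : Int) :
    pvRectBorder na x1 y1 x2 y2
      = PySem.Set.ofList
          ((((PySem.List.pyRange x1 (x2 + 1) 1).flatMap (pvRow y1 y2)).filter
              (pvBorderB x1 y1 x2 y2)).filter (fun p => ! PySem.Set.contains na p)) := by
  unfold pvRectBorder
  have houter : (fun (rb : PySem.Set (Int × Int)) (i : Int) =>
      (PySem.List.pyRange y1 (y2 + 1) 1).foldl (fun rb j =>
        if ¬ PySem.Set.contains na (i, j) then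
          if i = x1 ∨ i = x2 then PySem.Set.add rb (i, j)
          else if j = y1 ∨ j = y2 then PySem.Set.add rb (i, j)
          else rb
        else rb) rb)
    = (fun rb i => ((pvRow y1 y2 i).filter
        (fun p => (! PySem.Set.contains na p) && pvBorderB x1 y1 x2 y2 p)).foldl
        PySem.Set.add rb) := by
    funext rb i
    exact pvInner_eq na x1 y1 x2 y2 i rb
  rw [houter,
      foldl_foldl_flatMap
        (fun i => (pvRow y1 y2 i).filter
          (fun p => (! PySem.Set.contains na p) && pvBorderB x1 y1 x2 y2 p))
        PySem.Set.add,
      ← filter_flatMap, List.filter_filter, PySem.Set.ofList_eq_foldl]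
  rfl

-- the geometric heart: the border cells of the full grid and the perimeter list
-- have the same first-occurrence order
-- a row at i = x1 or i = x2 passes the border filter entirely
lemma row_filter_full (x1 y1 x2 y2 i : Int) (h : i = x1 ∨ i = x2) :
    (pvRow y1 y2 i).filter (pvBorderB x1 y1 x2 y2) = pvRow y1 y2 i := by
  refine List.filter_eq_self.mpr (fun p hp => ?_)
  simp only [pvRow, List.mem_map] at hp
  obtain ⟨j, _, rfl⟩ := hp
  rcases h with rfl | rfl <;> simp [pvBorderB]

-- a strictly interior row keeps only its two endpoints
lemma row_filter_mid (x1 y1 x2 y2 i : Int) (h1 : x1 < i) (h2 : i < x2) :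
    (pvRow y1 y2 i).filter (pvBorderB x1 y1 x2 y2)
      = ((PySem.List.pyRange y1 (y2 + 1) 1).filter (fun j => j == y1 || j == y2)).map
          (fun j => (i, j)) := by
  rw [pvRow, List.filter_map]
  congr 1
  refine List.filter_congr (fun j _ => ?_)
  have hne1 : (i == x1) = false := by simp; omega
  have hne2 : (i == x2) = false := by simp; omega
  simp [pvBorderB, Function.comp, hne1, hne2]

lemma range_filter_ends (y1 y2 : Int) (h : y1 ≤ y2) :
    (PySem.List.pyRange y1 (y2 + 1) 1).filter (fun j => j == y1 || j == y2)
      = if y1 < y2 then [y1, y2] else [y1] := by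
  by_cases hlt : y1 < y2
  · rw [if_pos hlt,
        PySem.List.pyRange_one_append y1 (y1 + 1) (y2 + 1) (by omega) (by omega),
        PySem.List.pyRange_one_append (y1 + 1) y2 (y2 + 1) (by omega) (by omega),
        PySem.List.pyRange_one_singleton,
        show PySem.List.pyRange y2 (y2 + 1) 1 = [y2] from PySem.List.pyRange_one_singleton y2,
        List.filter_append, List.filter_append,
        show List.filter (fun j => j == y1 || j == y2) (PySem.List.pyRange (y1 + 1) y2 1) = []
          from List.filter_eq_nil_iff.mpr (fun j hj => by
            rw [PySem.List.mem_pyRange_one] at hj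
            simp
            omega)]
    simp
  · have hy : y1 = y2 := by omega
    subst hy
    rw [if_neg hlt, show PySem.List.pyRange y1 (y1 + 1) 1 = [y1]
          from PySem.List.pyRange_one_singleton y1]
    simp

-- adding (i, y) twice is the same as adding it once, all along a row of cells
lemma foldl_add_dup (y : Int) :
    ∀ (mid : List Int) (s : PySem.Set (Int × Int)),
      (mid.flatMap (fun i => [(i, y), (i, y)])).foldl PySem.Set.add s
        = (mid.flatMap (fun i => [(i, y)])).foldl PySem.Set.add s := by
  intro mid
  induction mid with
  | nil => intro s; rfl
  | cons x xs ih =>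
    intro s
    simp only [List.flatMap_cons, List.foldl_append, List.foldl_cons, List.foldl_nil]
    rw [PySem.Set.add_of_mem (by rw [PySem.Set.mem_add]; exact Or.inr rfl)]
    exact ih _

lemma ofList_grid_eq_ofList_perimeter (x1 y1 x2 y2 : Int) :
    PySem.Set.ofList
        (((PySem.List.pyRange x1 (x2 + 1) 1).flatMap (pvRow y1 y2)).filter
          (pvBorderB x1 y1 x2 y2))
      = PySem.Set.ofList (pvPerimeter x1 y1 x2 y2) := by
  by_cases hx : x1 ≤ x2
  · by_cases hy : y1 ≤ y2
    · -- a real rectangle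
      rw [pvPerimeter, if_pos ⟨hx, hy⟩,
          PySem.List.foldl_append_eq_flatMap, List.nil_append]
      by_cases hxx : x1 < x2
      · rw [if_pos hxx,
            PySem.List.pyRange_one_append x1 (x1 + 1) (x2 + 1) (by omega) (by omega),
            PySem.List.pyRange_one_append (x1 + 1) x2 (x2 + 1) (by omega) (by omega),
            PySem.List.pyRange_one_singleton,
            show PySem.List.pyRange x2 (x2 + 1) 1 = [x2]
              from PySem.List.pyRange_one_singleton x2,
            List.flatMap_append, List.flatMap_append,
            List.flatMap_cons, List.flatMap_cons, List.flatMap_nil,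
            List.append_nil, List.append_nil,
            List.filter_append, List.filter_append,
            row_filter_full x1 y1 x2 y2 x1 (Or.inl rfl),
            row_filter_full x1 y1 x2 y2 x2 (Or.inr rfl),
            filter_flatMap]
        have hmid : (PySem.List.pyRange (x1 + 1) x2 1).flatMap
              (fun i => (pvRow y1 y2 i).filter (pvBorderB x1 y1 x2 y2))
            = (PySem.List.pyRange (x1 + 1) x2 1).flatMap
              (fun i => if y1 < y2 then [(i, y1), (i, y2)] else [(i, y1)]) := by
          refine List.flatMap_congr (fun i hi => ?_)
          rw [PySem.List.mem_pyRange_one] at hi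
          rw [row_filter_mid x1 y1 x2 y2 i (by omega) (by omega),
              range_filter_ends y1 y2 hy]
          by_cases hly : y1 < y2 <;> simp [hly]
        rw [hmid]
        by_cases hly : y1 < y2
        · simp only [if_pos hly]
          simp [pvRow, List.append_assoc]
        · have hyy : y1 = y2 := by omega
          subst hyy
          simp only [if_neg hly]
          rw [PySem.Set.ofList_eq_foldl, PySem.Set.ofList_eq_foldl,
              List.foldl_append, List.foldl_append, List.foldl_append, List.foldl_append,
              foldl_add_dup]
          rfl
      · have hxe : x1 = x2 := by omega
        subst hxe
        rw [if_neg hxx,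
            show PySem.List.pyRange x1 (x1 + 1) 1 = [x1]
              from PySem.List.pyRange_one_singleton x1,
            show PySem.List.pyRange (x1 + 1) x1 1 = []
              from PySem.List.pyRange_one_eq_nil (by omega),
            List.flatMap_cons, List.flatMap_nil, List.append_nil,
            row_filter_full x1 y1 x1 y2 x1 (Or.inl rfl)]
        simp [pvRow]
    · -- y2 < y1 : every row is empty and the perimeter guard fails
      have hrow : ∀ i : Int, pvRow y1 y2 i = [] := fun i => by
        rw [pvRow, PySem.List.pyRange_one_eq_nil (by omega)]
        rfl
      have hflat : (PySem.List.pyRange x1 (x2 + 1) 1).flatMap (pvRow y1 y2) = [] :=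
        List.flatMap_eq_nil_iff.mpr (fun i _ => hrow i)
      rw [pvPerimeter, if_neg (by omega : ¬ (x1 ≤ x2 ∧ y1 ≤ y2)), hflat]
      rfl
  · -- x2 < x1 : the grid is empty and the perimeter guard fails
    rw [show PySem.List.pyRange x1 (x2 + 1) 1 = []
          from PySem.List.pyRange_one_eq_nil (by omega),
        pvPerimeter, if_neg (by omega : ¬ (x1 ≤ x2 ∧ y1 ≤ y2))]
    rfl

lemma pvRectBorder_eq (na : PySem.Set (Int × Int)) (x1 y1 x2 y2 : Int) :
    pvRectBorder na x1 y1 x2 y2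
      = PySem.Set.ofList ((pvPerimeter x1 y1 x2 y2).filter (fun p => ! PySem.Set.contains na p)) := by
  rw [pvRectBorder_eq_fold, ofList_filter, ofList_grid_eq_ofList_perimeter, ← ofList_filter]

-- ===== VERDICT (by name: the statement is the Claim_ definition above) =====
theorem calc_borders_spec : Claim_equal_calc_borders := by
  intro rectangle _
  unfold Spec_calc_borders calc_borders calc_borders_alt
  rw [PySem.List.foldl_append_singleton_eq_map, List.map_map]
  refine List.map_congr_left (fun r _ => ?_)
  show pvRectBorder _ _ _ _ _ = _
  rw [pvRectBorder_eq, mul_comm r.1 2, mul_comm r.2.1 2, mul_comm r.2.2.1 2, mul_comm r.2.2.2 2]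
  exact congrArg _ (List.filter_congr (fun p _ => by
    rw [Bool.not_inj_iff, contains_pvNotAllowed]))
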